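-- pv_equiv track=rewrite | github.com/Emilien-Etadam/translate-book-skill | scripts/merge_and_build.py | apply_dedup_aliases
-- ===== SOURCE A (Python) =====
-- from typing import Dict, List, Optional, Tuple
--
-- def apply_dedup_aliases(
--     segments_translated: Dict[str, str],
--     dedup_map: Optional[Dict[str, str]],
-- ) -> Dict[str, str]:
--     """
--     Étend les traductions avec les alias dédupliqués.
--
--     Si ``dedup_map`` est absent, retourne une copie inchangée.
--     """
--     expanded = dict(segments_translated)
--     if not dedup_map:
--         return expanded
--
--     def resolve_canonical(sid: str) -> Optional[str]:
--         seen = set()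
--         cur = sid
--         while cur in dedup_map and cur not in seen:
--             seen.add(cur)
--             nxt = dedup_map[cur]
--             if nxt == cur:
--                 return cur
--             cur = nxt
--         return cur if cur not in seen else None
--
--     for sid in dedup_map:
--         if sid in expanded:
--             continue
--         canonical = resolve_canonical(sid)
--         if canonical and canonical in expanded:
--             expanded[sid] = expanded[canonical]
--     return expanded
-- ===== SOURCE B (Python) =====
-- from typing import Dict, Optional
--
--
-- def apply_dedup_aliases(
--     segments_translated: Dict[str, str],
--     dedup_map: Optional[Dict[str, str]],
-- ) -> Dict[str, str]:
--     """Same result as A, but canonical ids are resolved via a memo table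
--     shared across all ids, with path compression along each walked chain."""
--     expanded = dict(segments_translated)
--     if not dedup_map:
--         return expanded
--
--     memo: Dict[str, Optional[str]] = {}
--
--     def canonical_of(sid: str) -> Optional[str]:
--         path = []
--         cur = sid
--         while True:
--             if cur in memo:
--                 res = memo[cur]
--                 break
--             if cur in path:
--                 res = None
--                 break
--             nxt = dedup_map.get(cur)
--             if nxt is None or nxt == cur:
--                 res = cur
--                 break
--             path.append(cur)
--             cur = nxt
--         for p in path:
--             memo[p] = res
--         return res
--
--     for sid in dedup_map:
--         if sid in expanded:
--             continue
--         canonical = canonical_of(sid)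
--         if canonical and canonical in expanded:
--             expanded[sid] = expanded[canonical]
--     return expanded
-- ===== Notes on version B (the rewrite author's own statement) =====
-- stated objective: alternative
-- what changed: B resolves canonical ids with a memo table shared across all ids plus path compression (a resolved chain's result is written back to every node on the path and reused by later walks), instead of A's fresh chain walk with a local seen-set for every id.
import Mathlib
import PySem

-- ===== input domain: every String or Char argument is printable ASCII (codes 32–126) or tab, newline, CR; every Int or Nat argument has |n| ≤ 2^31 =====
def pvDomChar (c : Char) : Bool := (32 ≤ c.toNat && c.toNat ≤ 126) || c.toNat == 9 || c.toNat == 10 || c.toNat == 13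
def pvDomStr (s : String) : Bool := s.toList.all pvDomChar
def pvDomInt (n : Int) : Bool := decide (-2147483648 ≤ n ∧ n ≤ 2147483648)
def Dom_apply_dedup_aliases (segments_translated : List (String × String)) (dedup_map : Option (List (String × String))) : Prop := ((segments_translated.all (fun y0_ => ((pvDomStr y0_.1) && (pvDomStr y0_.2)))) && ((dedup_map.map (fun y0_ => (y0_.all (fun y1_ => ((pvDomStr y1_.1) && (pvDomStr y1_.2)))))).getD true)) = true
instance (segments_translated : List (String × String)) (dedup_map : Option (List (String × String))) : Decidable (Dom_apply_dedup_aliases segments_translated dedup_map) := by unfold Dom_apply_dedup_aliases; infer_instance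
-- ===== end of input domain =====

-- B resolves canonical ids via a memo table shared across all ids, with path
-- compression, instead of A's fresh chain walk with a local seen-set per id.

-- ===== PORT A =====
-- A's inner `resolve_canonical` while-loop; the fuel (#keys + 1) bounds the number
-- of iterations, since each one adds a distinct key of the dict to `seen`.
def pvResolveA (d : PySem.Dict String String) : Nat → List String → String → Option String
  | 0, _, _ => none
  | f+1, seen, cur =>
    match PySem.Dict.get? d cur with
    | none => if cur ∈ seen then none else some cur
    | some nxt =>
      if cur ∈ seen then none
      else if nxt = cur then some cur
      else pvResolveA d f (cur :: seen) nxt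

def apply_dedup_aliases (segments_translated : List (String × String)) (dedup_map : Option (List (String × String))) : List (String × String) :=
  let expanded := PySem.Dict.ofList segments_translated
  match dedup_map with
  | none => expanded.items
  | some dml =>
    if dml = [] then expanded.items
    else
      let d := PySem.Dict.ofList dml
      (List.foldl (fun (e : PySem.Dict String String) sid =>
          if (PySem.Dict.get? e sid).isSome then e
          else
            match pvResolveA d ((PySem.Dict.keys d).length + 1) [] sid with
            | none => e
            | some c =>
              if c ≠ "" then
                match PySem.Dict.get? e c with
                | some v => PySem.Dict.insert e sid v
                | none => e
              else e)
        expanded (PySem.Dict.keys d)).items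

-- ===== PORT B =====
-- B's `canonical_of`: walk with a memo of already-resolved ids; on exit the result is
-- written back to every id on the walked path (path compression). Fuel as in A's port.
def pvWalkB (d : PySem.Dict String String) : Nat → PySem.Dict String (Option String) → List String → String → Option String × PySem.Dict String (Option String)
  | 0, memo, _, _ => (none, memo)
  | f+1, memo, path, cur =>
    match PySem.Dict.get? memo cur with
    | some r => (r, List.foldl (fun m p => PySem.Dict.insert m p r) memo path)
    | none =>
      if cur ∈ path then (none, List.foldl (fun m p => PySem.Dict.insert m p (none : Option String)) memo path)
      else
        match PySem.Dict.get? d cur with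
        | none => (some cur, List.foldl (fun m p => PySem.Dict.insert m p (some cur)) memo path)
        | some nxt =>
          if nxt = cur then (some cur, List.foldl (fun m p => PySem.Dict.insert m p (some cur)) memo path)
          else pvWalkB d f memo (path ++ [cur]) nxt

def apply_dedup_aliases_alt (segments_translated : List (String × String)) (dedup_map : Option (List (String × String))) : List (String × String) :=
  let expanded := PySem.Dict.ofList segments_translated
  match dedup_map with
  | none => expanded.items
  | some dml =>
    if dml = [] then expanded.items
    else
      let d := PySem.Dict.ofList dml
      (List.foldl (fun (em : PySem.Dict String String × PySem.Dict String (Option String)) sid =>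
          if (PySem.Dict.get? em.1 sid).isSome then em
          else
            let rm := pvWalkB d ((PySem.Dict.keys d).length + 1) em.2 [] sid
            match rm.1 with
            | none => (em.1, rm.2)
            | some c =>
              if c ≠ "" then
                match PySem.Dict.get? em.1 c with
                | some v => (PySem.Dict.insert em.1 sid v, rm.2)
                | none => (em.1, rm.2)
              else (em.1, rm.2))
        (expanded, PySem.Dict.empty) (PySem.Dict.keys d)).1.items

-- ===== PRECONDITION & SPEC =====
def Spec_apply_dedup_aliases (segments_translated : List (String × String)) (dedup_map : Option (List (String × String))) (out : List (String × String)) : Prop := out = apply_dedup_aliases_alt segments_translated dedup_map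
instance (segments_translated : List (String × String)) (dedup_map : Option (List (String × String))) (out : List (String × String)) : Decidable (Spec_apply_dedup_aliases segments_translated dedup_map out) := by unfold Spec_apply_dedup_aliases; infer_instance

-- ===== CLAIM (what is proved, stated in full; the proofs are below) =====
def Claim_equal_apply_dedup_aliases : Prop := ∀ (segments_translated : List (String × String)) (dedup_map : Option (List (String × String))), Dom_apply_dedup_aliases segments_translated dedup_map → Spec_apply_dedup_aliases segments_translated dedup_map (apply_dedup_aliases segments_translated dedup_map)

-- ===== LEMMAS AND PROOFS =====

-- a chain of non-self edges of d: x0 → x1 → … → t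
def pvIsChain (d : PySem.Dict String String) : List String → String → Prop
  | [], _ => True
  | [x], t => PySem.Dict.get? d x = some t ∧ t ≠ x
  | x :: y :: ys, t => PySem.Dict.get? d x = some y ∧ y ≠ x ∧ pvIsChain d (y :: ys) t

-- number of keys of d not yet in seen (bounds the remaining iterations)
def pvFree (d : PySem.Dict String String) (seen : List String) : Nat :=
  ((PySem.Dict.keys d).filter (fun k => !(seen.contains k))).length

-- resolve with just enough fuel (the canonical value of A's while loop)
def pvRes (d : PySem.Dict String String) (seen : List String) (cur : String) : Option String :=
  pvResolveA d (pvFree d seen + 1) seen cur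

-- every memo entry is the from-scratch resolution of its key
def pvImemo (d : PySem.Dict String String) (memo : PySem.Dict String (Option String)) : Prop :=
  ∀ k r, PySem.Dict.get? memo k = some r → r = pvRes d [] k

theorem pvZ (d : PySem.Dict String String) (f : Nat) (seen : List String) (cur : String)
    (h : cur ∈ seen) : pvResolveA d f seen cur = none := by
  cases f with
  | zero => rfl
  | succ f =>
    unfold pvResolveA
    cases hg : PySem.Dict.get? d cur with
    | none => simp [h]
    | some nxt => simp [h]

theorem pvSeenCongr (d : PySem.Dict String String) (f : Nat) (s₁ s₂ : List String) (cur : String)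
    (h : ∀ x, x ∈ s₁ ↔ x ∈ s₂) : pvResolveA d f s₁ cur = pvResolveA d f s₂ cur := by
  induction f generalizing s₁ s₂ cur with
  | zero => rfl
  | succ f ih =>
    unfold pvResolveA
    cases hg : PySem.Dict.get? d cur with
    | none => simp only [h cur]
    | some nxt =>
      simp only [h cur]
      by_cases hc : cur ∈ s₂
      · simp [hc]
      · simp only [hc, if_false]
        by_cases hn : nxt = cur
        · simp [hn]
        · simp only [hn, if_false]
          exact ih _ _ _ (by intro x; simp [h x])

theorem pvN (d : PySem.Dict String String) (P : List String) (x t : String) (f : Nat) (seen : List String)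
    (hc : pvIsChain d (x :: P) t) (ht : t ∈ seen) : pvResolveA d f seen x = none := by
  induction P generalizing f x seen with
  | nil =>
    rcases hc with ⟨hg, hne⟩
    cases f with
    | zero => rfl
    | succ f =>
      simp only [pvResolveA, hg]
      by_cases hs : x ∈ seen
      · simp [hs]
      · rw [if_neg hs, if_neg (fun h : t = x => hne h)]
        exact pvZ d f (x :: seen) t (by simp [ht])
  | cons y ys ih =>
    rcases hc with ⟨hg, hne, hrest⟩
    cases f with
    | zero => rfl
    | succ f =>
      simp only [pvResolveA, hg]
      by_cases hs : x ∈ seen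
      · simp [hs]
      · rw [if_neg hs, if_neg hne]
        exact ih _ _ _ hrest (by simp [ht])

theorem pvFilterLt (l : List String) (p q : String → Bool) (x : String)
    (himp : ∀ a, p a = true → q a = true) (hp : p x = false) (hq : q x = true) :
    ∀ _ : x ∈ l, (l.filter p).length < (l.filter q).length := by
  induction l with
  | nil => intro h; cases h
  | cons a as ih =>
    intro hx
    rcases List.mem_cons.1 hx with rfl | hmem
    · have hle : (as.filter p).length ≤ (as.filter q).length :=
        (List.monotone_filter_right as (by intro a ha; exact himp a ha)).length_le
      simp [hp, hq]
      omega
    · simp only [List.filter_cons]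
      by_cases hpa : p a = true
      · simp [hpa, himp a hpa]; exact ih hmem
      · simp only [hpa, if_false, Bool.false_eq_true]
        by_cases hqa : q a = true
        · simp only [hqa, if_true, List.length_cons]
          have := ih hmem; omega
        · simp only [hqa, if_false, Bool.false_eq_true]
          exact ih hmem

theorem pvMemKeys (d : PySem.Dict String String) (cur nxt : String)
    (hg : PySem.Dict.get? d cur = some nxt) : cur ∈ PySem.Dict.keys d := by
  by_contra h
  rw [(PySem.Dict.get?_eq_none_iff_not_mem_keys d cur).2 h] at hg
  cases hg

theorem pvFree_le (d : PySem.Dict String String) (seen : List String) :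
    pvFree d seen ≤ (PySem.Dict.keys d).length := by
  exact List.length_filter_le _ _

theorem pvFree_nil (d : PySem.Dict String String) :
    pvFree d [] = (PySem.Dict.keys d).length := by
  simp [pvFree]

theorem pvFree_cons_lt (d : PySem.Dict String String) (seen : List String) (cur : String)
    (hk : cur ∈ PySem.Dict.keys d) (hs : cur ∉ seen) : pvFree d (cur :: seen) < pvFree d seen := by
  exact pvFilterLt (PySem.Dict.keys d)
    (fun k => !((cur :: seen).contains k)) (fun k => !(seen.contains k)) cur
    (by intro a ha; simp at ha ⊢; exact ha.2)
    (by simp) (by simp [hs]) hk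

theorem pvF3 (d : PySem.Dict String String) (f : Nat) (seen : List String) (cur : String)
    (h : pvFree d seen < f) : pvResolveA d f seen cur = pvRes d seen cur := by
  have F1 : ∀ f seen cur, pvFree d seen < f →
      pvResolveA d f seen cur = pvResolveA d (f + 1) seen cur := by
    intro f
    induction f with
    | zero => intro seen cur h; omega
    | succ f ih =>
      intro seen cur h
      simp only [pvResolveA]
      cases hg : PySem.Dict.get? d cur with
      | none => rfl
      | some nxt =>
        by_cases hc : cur ∈ seen
        · simp [hc]
        · simp only [hc, if_false]
          by_cases hn : nxt = cur
          · simp [hn]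
          · simp only [hn, if_false]
            exact ih _ _ (by
              have := pvFree_cons_lt d seen cur (pvMemKeys d cur nxt hg) hc
              omega)
  have F2 : ∀ g f seen cur, pvFree d seen < f →
      pvResolveA d f seen cur = pvResolveA d (f + g) seen cur := by
    intro g
    induction g with
    | zero => intro f seen cur h; rfl
    | succ g ih =>
      intro f seen cur h
      rw [ih f seen cur h, show f + (g + 1) = (f + g) + 1 from by omega]
      exact F1 (f + g) seen cur (by omega)
  unfold pvRes
  rw [show f = (pvFree d seen + 1) + (f - (pvFree d seen + 1)) from by omega]
  exact (F2 _ _ seen cur (by omega)).symm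

theorem pvE (d : PySem.Dict String String) (f : Nat) (extra seenC : List String) (cur : String)
    (hinv : ∀ x ∈ extra, ∃ Q t, pvIsChain d (x :: Q) t ∧ (t ∈ seenC ∨ t = cur))
    (hcur : cur ∉ extra) :
    pvResolveA d f (extra ++ seenC) cur = pvResolveA d f seenC cur := by
  induction f generalizing seenC cur with
  | zero => rfl
  | succ f ih =>
    simp only [pvResolveA]
    cases hg : PySem.Dict.get? d cur with
    | none =>
      by_cases hc : cur ∈ seenC
      · simp [hc, List.mem_append]
      · simp [hc, List.mem_append, hcur]
    | some nxt =>
      by_cases hc : cur ∈ seenC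
      · simp [hc, List.mem_append]
      · have hcc : cur ∉ extra ++ seenC := by simp [List.mem_append, hcur, hc]
        simp only [hcc, hc, if_false]
        by_cases hn : nxt = cur
        · simp [hn]
        · simp only [hn, if_false]
          by_cases hx : nxt ∈ extra
          · rw [pvZ d f (cur :: (extra ++ seenC)) nxt (by simp [List.mem_append, hx])]
            obtain ⟨Q, t, hchain, ht⟩ := hinv nxt hx
            rw [pvN d Q nxt t f (cur :: seenC) hchain
              (by rcases ht with h | h <;> simp [h])]
          · rw [pvSeenCongr d f (cur :: (extra ++ seenC)) (extra ++ (cur :: seenC)) nxt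
              (by intro x; simp [List.mem_append]; tauto)]
            exact ih (cur :: seenC) nxt
              (by intro x hxe
                  obtain ⟨Q, t, hchain, ht⟩ := hinv x hxe
                  exact ⟨Q, t, hchain, Or.inl (by rcases ht with h | h <;> simp [h])⟩)
              hx

theorem pvStep (d : PySem.Dict String String) (seen : List String) (cur nxt : String)
    (hs : cur ∉ seen) (hg : PySem.Dict.get? d cur = some nxt) (hne : nxt ≠ cur) :
    pvRes d seen cur = pvRes d (cur :: seen) nxt := by
  unfold pvRes
  simp only [pvResolveA, hg, hs, if_false, hne]
  exact pvF3 d (pvFree d seen) (cur :: seen) nxt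
    (pvFree_cons_lt d seen cur (pvMemKeys d cur nxt hg) hs)

theorem pvChainSuffix (d : PySem.Dict String String) (path : List String) (cur : String)
    (hc : pvIsChain d path cur) : ∀ x ∈ path, ∃ Q, pvIsChain d (x :: Q) cur := by
  induction path with
  | nil => intro x hx; cases hx
  | cons y ys ih =>
    intro x hx
    cases ys with
    | nil =>
      rcases List.mem_singleton.1 hx with rfl
      exact ⟨[], hc⟩
    | cons z zs =>
      obtain ⟨h1, h2, hrest⟩ := hc
      rcases List.mem_cons.1 hx with rfl | hmem
      · exact ⟨z :: zs, h1, h2, hrest⟩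
      · exact ih hrest x hmem

theorem pvRes_extra (d : PySem.Dict String String) (extra : List String) (cur : String)
    (hinv : ∀ x ∈ extra, ∃ Q, pvIsChain d (x :: Q) cur) (hcur : cur ∉ extra) :
    pvRes d extra cur = pvRes d [] cur := by
  have h1 : pvFree d extra < (PySem.Dict.keys d).length + 1 :=
    lt_of_le_of_lt (pvFree_le d extra) (by omega)
  have h2 : pvFree d [] < (PySem.Dict.keys d).length + 1 := by
    rw [pvFree_nil]; omega
  rw [← pvF3 d ((PySem.Dict.keys d).length + 1) extra cur h1,
      ← pvF3 d ((PySem.Dict.keys d).length + 1) [] cur h2]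
  have := pvE d ((PySem.Dict.keys d).length + 1) extra [] cur
    (by intro x hx; obtain ⟨Q, hc⟩ := hinv x hx; exact ⟨Q, cur, hc, Or.inr rfl⟩) hcur
  simpa using this

theorem pvRes_fresh (d : PySem.Dict String String) (path : List String) (cur : String)
    (hc : pvIsChain d path cur) (hcur : cur ∉ path) :
    pvRes d path.reverse cur = pvRes d [] cur := by
  exact pvRes_extra d path.reverse cur
    (by intro x hx; exact pvChainSuffix d path cur hc x (List.mem_reverse.1 hx))
    (by simpa using hcur)

theorem pvChainRes (d : PySem.Dict String String) (path : List String) (cur : String)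
    (hc : pvIsChain d path cur) : ∀ p ∈ path, pvRes d [] p = pvRes d [] cur := by
  induction path with
  | nil => intro p hp; cases hp
  | cons x rest ih =>
    intro p hp
    cases rest with
    | nil =>
      obtain ⟨hg, hne⟩ := hc
      rcases List.mem_singleton.1 hp with rfl
      rw [pvStep d [] p cur (by simp) hg hne]
      exact pvRes_extra d [p] cur (fun x hx => by
        rcases List.mem_singleton.1 hx with rfl; exact ⟨[], hg, hne⟩)
        (by simpa using hne)
    | cons y ys =>
      obtain ⟨hg, hny, hrest⟩ := hc
      rcases List.mem_cons.1 hp with rfl | hmem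
      · rw [pvStep d [] p y (by simp) hg hny]
        have h1 : pvRes d [p] y = pvRes d [] y :=
          pvRes_extra d [p] y (fun x hx => by
            rcases List.mem_singleton.1 hx with rfl; exact ⟨[], hg, hny⟩)
            (by simpa using hny)
        rw [h1, ih hrest y (List.mem_cons_self)]
      · exact ih hrest p hmem

theorem pvChainAppend (d : PySem.Dict String String) (path : List String) (cur nxt : String)
    (hc : pvIsChain d path cur) (hg : PySem.Dict.get? d cur = some nxt) (hne : nxt ≠ cur) :
    pvIsChain d (path ++ [cur]) nxt := by
  induction path generalizing cur with
  | nil => exact ⟨hg, hne⟩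
  | cons y ys ih =>
    cases ys with
    | nil =>
      obtain ⟨h1, h2⟩ := hc
      exact ⟨h1, h2, hg, hne⟩
    | cons z zs =>
      obtain ⟨h1, h2, hrest⟩ := hc
      exact ⟨h1, h2, ih cur hrest hg hne⟩

theorem pvMemoWrite (path : List String) (r : Option String) (memo : PySem.Dict String (Option String)) (k : String) :
    PySem.Dict.get? (List.foldl (fun m p => PySem.Dict.insert m p r) memo path) k
      = if k ∈ path then some r else PySem.Dict.get? memo k := by
  induction path generalizing memo with
  | nil => simp
  | cons p rest ih =>
    simp only [List.foldl_cons, ih, List.mem_cons]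
    by_cases hr : k ∈ rest
    · simp [hr]
    · by_cases hk : k = p
      · simp [hk]
      · simp [hk, hr, PySem.Dict.get?_insert]

theorem pvW (d : PySem.Dict String String) (f : Nat) (path : List String) (memo : PySem.Dict String (Option String)) (cur : String)
    (hI : pvImemo d memo) (hc : pvIsChain d path cur) (hnd : path.Nodup)
    (hm : ∀ p ∈ path, PySem.Dict.get? memo p = none)
    (hf : pvFree d path.reverse < f) :
    (pvWalkB d f memo path cur).1 = pvRes d path.reverse cur
      ∧ (∀ p ∈ path, pvRes d [] p = (pvWalkB d f memo path cur).1)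
      ∧ pvImemo d (pvWalkB d f memo path cur).2 := by
  induction f generalizing path memo cur with
  | zero => omega
  | succ f ih =>
    have hres_of_mem : ∀ p ∈ path, pvRes d [] p = pvRes d [] cur :=
      pvChainRes d path cur hc
    cases hmemo : PySem.Dict.get? memo cur with
    | some r =>
      have hr : r = pvRes d [] cur := hI cur r hmemo
      have hcp : cur ∉ path := by
        intro hin; rw [hm cur hin] at hmemo; cases hmemo
      have hfr : pvRes d path.reverse cur = pvRes d [] cur := pvRes_fresh d path cur hc hcp
      simp only [pvWalkB, hmemo]
      refine ⟨by rw [hfr, hr], ?_, ?_⟩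
      · intro p hp
        rw [hres_of_mem p hp, hr]
      · intro k rr hk
        rw [pvMemoWrite] at hk
        by_cases hkp : k ∈ path
        · rw [if_pos hkp] at hk
          cases hk
          rw [hr, hres_of_mem k hkp]
        · rw [if_neg hkp] at hk
          exact hI k rr hk
    | none =>
      have hwr : ∀ (r : Option String), (∀ p ∈ path, pvRes d [] p = r) →
          pvImemo d (List.foldl (fun m p => PySem.Dict.insert m p r) memo path) := by
        intro r hall k rr hk
        rw [pvMemoWrite] at hk
        by_cases hkp : k ∈ path
        · rw [if_pos hkp] at hk
          cases hk
          exact (hall k hkp).symm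
        · rw [if_neg hkp] at hk
          exact hI k rr hk
      by_cases hcp : cur ∈ path
      · -- cycle detected
        have hcyc : pvRes d [] cur = none := by
          obtain ⟨Q, hQ⟩ := pvChainSuffix d path cur hc cur hcp
          cases Q with
          | nil => exact absurd rfl hQ.2
          | cons y ys =>
            obtain ⟨hg, hny, hrest⟩ := hQ
            unfold pvRes
            simp only [pvResolveA, hg]
            rw [if_neg (by simp), if_neg hny]
            exact pvN d ys y cur _ [cur] hrest (by simp)
        simp only [pvWalkB, hmemo, if_pos hcp]
        refine ⟨?_, ?_, hwr none (fun p hp => by rw [hres_of_mem p hp, hcyc])⟩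
        · exact (pvZ d _ path.reverse cur (by simpa using hcp)).symm
        · intro p hp
          rw [hres_of_mem p hp, hcyc]
      · -- cur not yet on the path
        cases hg : PySem.Dict.get? d cur with
        | none =>
          have hterm : pvRes d [] cur = some cur := by
            unfold pvRes; simp [pvResolveA, hg]
          have hterm' : pvRes d path.reverse cur = some cur := by
            unfold pvRes
            simp only [pvResolveA, hg]
            rw [if_neg (by simpa using hcp)]
          simp only [pvWalkB, hmemo, if_neg hcp, hg]
          exact ⟨hterm'.symm, fun p hp => by rw [hres_of_mem p hp, hterm],
            hwr (some cur) (fun p hp => by rw [hres_of_mem p hp, hterm])⟩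
        | some nxt =>
          by_cases hn : nxt = cur
          · have hterm : pvRes d [] cur = some cur := by
              unfold pvRes; simp [pvResolveA, hg, hn]
            have hterm' : pvRes d path.reverse cur = some cur := by
              unfold pvRes
              simp only [pvResolveA, hg]
              rw [if_neg (by simpa using hcp), if_pos hn]
            simp only [pvWalkB, hmemo, if_neg hcp, hg, if_pos hn]
            exact ⟨hterm'.symm, fun p hp => by rw [hres_of_mem p hp, hterm],
              hwr (some cur) (fun p hp => by rw [hres_of_mem p hp, hterm])⟩
          · have hrev : (path ++ [cur]).reverse = cur :: path.reverse := by
              simp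
            have hih := ih (path ++ [cur]) memo nxt hI
              (pvChainAppend d path cur nxt hc hg hn)
              (by rw [List.nodup_append]; exact ⟨hnd, List.nodup_singleton _, fun a ha b hb => by
                  rcases List.mem_singleton.1 hb with rfl
                  exact fun h => hcp (h ▸ ha)⟩)
              (by intro p hp
                  rcases List.mem_append.1 hp with h | h
                  · exact hm p h
                  · rcases List.mem_singleton.1 h with rfl; exact hmemo)
              (by rw [hrev]
                  have := pvFree_cons_lt d path.reverse cur (pvMemKeys d cur nxt hg)
                    (by simpa using hcp)
                  omega)
            obtain ⟨e1, e2, e3⟩ := hih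
            simp only [pvWalkB, hmemo, if_neg hcp, hg, if_neg hn]
            refine ⟨?_, ?_, e3⟩
            · rw [pvStep d path.reverse cur nxt (by simpa using hcp) hg hn, ← hrev]
              exact e1
            · intro p hp
              exact e2 p (List.mem_append.2 (Or.inl hp))

theorem pvLoop (d : PySem.Dict String String) (ks : List String) (e : PySem.Dict String String)
    (memo : PySem.Dict String (Option String)) (hI : pvImemo d memo) :
    List.foldl (fun (e : PySem.Dict String String) sid =>
        if (PySem.Dict.get? e sid).isSome then e
        else
          match pvResolveA d ((PySem.Dict.keys d).length + 1) [] sid with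
          | none => e
          | some c =>
            if c ≠ "" then
              match PySem.Dict.get? e c with
              | some v => PySem.Dict.insert e sid v
              | none => e
            else e) e ks
      = (List.foldl (fun (em : PySem.Dict String String × PySem.Dict String (Option String)) sid =>
          if (PySem.Dict.get? em.1 sid).isSome then em
          else
            let rm := pvWalkB d ((PySem.Dict.keys d).length + 1) em.2 [] sid
            match rm.1 with
            | none => (em.1, rm.2)
            | some c =>
              if c ≠ "" then
                match PySem.Dict.get? em.1 c with
                | some v => (PySem.Dict.insert em.1 sid v, rm.2)
                | none => (em.1, rm.2)
              else (em.1, rm.2)) (e, memo) ks).1 := by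
  induction ks generalizing e memo with
  | nil => rfl
  | cons sid rest ih =>
    simp only [List.foldl_cons]
    by_cases he : (PySem.Dict.get? e sid).isSome
    · rw [if_pos he, if_pos he]
      exact ih e memo hI
    · obtain ⟨w1, w2, w3⟩ := pvW d ((PySem.Dict.keys d).length + 1) [] memo sid hI
        trivial List.nodup_nil (by intro p hp; cases hp)
        (by simp only [List.reverse_nil]; rw [pvFree_nil]; omega)
      have hA : pvResolveA d ((PySem.Dict.keys d).length + 1) [] sid = pvRes d [] sid :=
        pvF3 d _ [] sid (by rw [pvFree_nil]; omega)
      rw [List.reverse_nil] at w1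
      rw [if_neg he, if_neg he, hA]
      cases hres : pvRes d [] sid with
      | none =>
        rw [hres] at w1
        simp only [w1]
        exact ih e _ w3
      | some c =>
        rw [hres] at w1
        simp only [w1]
        by_cases hcn : c ≠ ""
        · rw [if_pos hcn, if_pos hcn]
          cases hgc : PySem.Dict.get? e c with
          | none => exact ih e _ w3
          | some v => exact ih _ _ w3
        · rw [if_neg hcn, if_neg hcn]
          exact ih e _ w3

-- ===== VERDICT (by name: the statement is the Claim_ definition above) =====
theorem apply_dedup_aliases_spec : Claim_equal_apply_dedup_aliases := by
  intro st dm _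
  unfold Spec_apply_dedup_aliases apply_dedup_aliases apply_dedup_aliases_alt
  cases dm with
  | none => rfl
  | some dml =>
    by_cases hd : dml = []
    · simp [hd]
    · simp only [hd, if_false]
      rw [pvLoop (PySem.Dict.ofList dml) (PySem.Dict.keys (PySem.Dict.ofList dml))
        (PySem.Dict.ofList st) PySem.Dict.empty
        (by intro k r h; rw [PySem.Dict.get?_empty] at h; cases h)]
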